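-- pv_equiv track=rewrite | github.com/jaydonkc/openclaw-memory-stack | scripts/build_coding_context.py | parse_milvus_output
-- ===== SOURCE A (Python) =====
-- def parse_milvus_output(text: str):
--     blocks = []
--     cur = {}
--     for ln in text.splitlines():
--         ln = ln.strip()
--         if ln.startswith("[") and "score=" in ln:
--             if cur:
--                 blocks.append(cur)
--             cur = {"score": ln, "path": "", "text": ""}
--         elif ln.startswith("ns=") or ln.startswith("ns:"):
--             cur["path"] = ln
--         elif ln.startswith("text=") or ln.startswith("text:"):
--             cur["text"] = ln.replace("text=", "").replace("text:", "", 1).strip()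
--     if cur:
--         blocks.append(cur)
--     return blocks[:5]
-- ===== SOURCE B (Python) =====
-- def _is_header(ln):
--     return ln.startswith("[") and "score=" in ln
--
--
-- def _is_ns(ln):
--     return ln.startswith("ns=") or ln.startswith("ns:")
--
--
-- def _is_text(ln):
--     return ln.startswith("text=") or ln.startswith("text:")
--
--
-- def _text_val(ln):
--     return ln.replace("text=", "").replace("text:", "", 1).strip()
--
--
-- def parse_milvus_output(text: str):
--     lines = [ln.strip() for ln in text.splitlines()]
--     segs = []
--     for ln in lines:
--         if _is_header(ln):
--             segs.append((ln, []))
--         elif segs: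
--             segs[-1][1].append(ln)
--     return [{
--         "score": header,
--         "path": next((ln for ln in reversed(body) if _is_ns(ln)), ""),
--         "text": next((_text_val(ln) for ln in reversed(body) if _is_text(ln)), ""),
--     } for header, body in segs[:5]]
-- ===== Notes on version B (the rewrite author's own statement) =====
-- stated objective: alternative
-- what changed: B replaces A's single stateful loop mutating a current dict with a two-phase decomposition: first segment the stripped lines into (header, body) pairs, then build each block directly as {score, path, text} with path/text found by a backward search for the last matching line.
-- intended difference: On inputs where an ns=/ns:/text=/text: line precedes the first header line (one starting with a bracket and containing a score field), A returns an extra leading score-less dict built from stray loop state before any block was opened; B returns only the header-led blocks, which is the intended behaviour since every parsed block should be a scored Milvus hit. — e.g. on parse_milvus_output("ns=a"): A returns [[("path", "ns=a")]], B returns []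
import Mathlib
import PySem

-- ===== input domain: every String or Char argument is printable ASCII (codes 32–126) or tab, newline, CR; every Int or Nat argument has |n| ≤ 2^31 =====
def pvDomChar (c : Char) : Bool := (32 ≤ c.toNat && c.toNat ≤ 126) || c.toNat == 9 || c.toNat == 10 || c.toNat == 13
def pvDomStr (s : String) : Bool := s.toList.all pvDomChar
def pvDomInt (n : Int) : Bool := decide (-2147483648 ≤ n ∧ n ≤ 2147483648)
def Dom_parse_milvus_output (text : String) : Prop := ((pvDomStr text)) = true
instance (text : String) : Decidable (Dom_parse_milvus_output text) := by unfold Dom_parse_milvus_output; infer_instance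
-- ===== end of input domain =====

-- B re-decomposes A's stateful parsing loop into segmentation by header lines followed by direct
-- per-segment block construction (alternative decomposition, same cost); B intentionally drops A's
-- accidental leading score-less block (see D_ below); return value only.

-- ===== PORT A =====
-- line classifiers: the identical Python boolean expressions appear in both Source A and Source B
def pmoIsHdr (ln : String) : Bool := PySem.Str.startswith ln "[" && PySem.Str.isIn "score=" ln
def pmoIsNs (ln : String) : Bool := PySem.Str.startswith ln "ns=" || PySem.Str.startswith ln "ns:"
def pmoIsTxt (ln : String) : Bool := PySem.Str.startswith ln "text=" || PySem.Str.startswith ln "text:"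

-- s.replace(old, "", 1): hand port (PySem.Str.replace has no count); exact for nonempty old
def pmoReplaceOnce (s old : String) : String :=
  let i := PySem.Chars.find s.toList old.toList
  if i = -1 then s else String.ofList (s.toList.take i.toNat ++ s.toList.drop (i.toNat + old.toList.length))

-- ln.replace("text=", "").replace("text:", "", 1).strip()  (identical expression in both Pythons)
def pmoTextVal (ln : String) : String :=
  PySem.Str.strip (pmoReplaceOnce (PySem.Str.replace ln "text=" "") "text:")

-- the body of A's for-loop, state = (blocks, cur)
def pmoStepA (st : List (PySem.Dict String String) × PySem.Dict String String) (ln0 : String) :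
    List (PySem.Dict String String) × PySem.Dict String String :=
  let ln := PySem.Str.strip ln0
  if pmoIsHdr ln then
    ((if st.2.items.isEmpty then st.1 else st.1 ++ [st.2]),
     PySem.Dict.ofList [("score", ln), ("path", ""), ("text", "")])
  else if pmoIsNs ln then (st.1, st.2.insert "path" ln)
  else if pmoIsTxt ln then (st.1, st.2.insert "text" (pmoTextVal ln))
  else st

def parse_milvus_output (text : String) : List (List (String × String)) :=
  let st := (PySem.Str.splitlines text).foldl pmoStepA ([], PySem.Dict.empty)
  let blocks := if st.2.items.isEmpty then st.1 else st.1 ++ [st.2]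
  (blocks.take 5).map PySem.Dict.items

-- ===== PORT B =====
-- Source B's segmentation loop: a header opens a new segment, other lines join the last open segment
def pmoSegStepF (st : List (String × List String)) (ln : String) : List (String × List String) :=
  if pmoIsHdr ln then st ++ [(ln, [])]
  else match st.getLast? with
    | none => st
    | some last => st.dropLast ++ [(last.1, last.2 ++ [ln])]

-- one block of Source B's final comprehension: path/text by backward search (next(... reversed ...))
def pmoBlockOf (seg : String × List String) : List (String × String) :=
  [("score", seg.1),
   ("path", (seg.2.reverse.find? pmoIsNs).getD ""),
   ("text", ((seg.2.reverse.find? pmoIsTxt).map pmoTextVal).getD "")]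

def parse_milvus_output_alt (text : String) : List (List (String × String)) :=
  let lines := (PySem.Str.splitlines text).map PySem.Str.strip
  let segs := lines.foldl pmoSegStepF []
  (segs.take 5).map pmoBlockOf

-- ===== PRECONDITION & SPEC =====
-- On inputs where an ns=/ns:/text=/text: line precedes the first header line (one starting with a
-- bracket and containing a score field), A
-- returns an extra leading score-less dict built from stray loop state before any block was opened;
-- B returns only the header-led blocks, which is intended: every parsed block should be a scored hit.
def D_parse_milvus_output (text : String) : Prop :=
  (((PySem.Str.splitlines text).map PySem.Str.strip).takeWhile (fun ln => !pmoIsHdr ln)).any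
    (fun ln => pmoIsNs ln || pmoIsTxt ln) = true
instance (text : String) : Decidable (D_parse_milvus_output text) := by
  unfold D_parse_milvus_output; infer_instance

def Spec_parse_milvus_output (text : String) (out : List (List (String × String))) : Prop :=
  ¬ D_parse_milvus_output text → out = parse_milvus_output_alt text
instance (text : String) (out : List (List (String × String))) : Decidable (Spec_parse_milvus_output text out) := by
  unfold Spec_parse_milvus_output; infer_instance

def pvDiffWitness_parse_milvus_output : String := "ns=a"
def pvDiffWitnessOut_parse_milvus_output :
    (List (List (String × String))) × (List (List (String × String))) :=
  ([[("path", "ns=a")]], [])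

-- ===== CLAIM (what is proved, stated in full; the proofs are below) =====
def Claim_unchanged_parse_milvus_output : Prop :=
  ∀ (text : String), Dom_parse_milvus_output text →
    Spec_parse_milvus_output text (parse_milvus_output text)
def Claim_changed_parse_milvus_output : Prop :=
  Dom_parse_milvus_output (pvDiffWitness_parse_milvus_output) ∧
  D_parse_milvus_output (pvDiffWitness_parse_milvus_output) ∧
  parse_milvus_output (pvDiffWitness_parse_milvus_output) = pvDiffWitnessOut_parse_milvus_output.1 ∧
  parse_milvus_output_alt (pvDiffWitness_parse_milvus_output) = pvDiffWitnessOut_parse_milvus_output.2 ∧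
  pvDiffWitnessOut_parse_milvus_output.1 ≠ pvDiffWitnessOut_parse_milvus_output.2
def Claim_exact_parse_milvus_output : Prop :=
  ∀ (text : String), Dom_parse_milvus_output text → D_parse_milvus_output text →
    parse_milvus_output text ≠ parse_milvus_output_alt text

-- ===== LEMMAS AND PROOFS =====

-- A's loop body on an already-stripped line
def pmoStepA' (st : List (PySem.Dict String String) × PySem.Dict String String) (ln : String) :
    List (PySem.Dict String String) × PySem.Dict String String :=
  if pmoIsHdr ln then
    ((if st.2.items.isEmpty then st.1 else st.1 ++ [st.2]),
     PySem.Dict.ofList [("score", ln), ("path", ""), ("text", "")])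
  else if pmoIsNs ln then (st.1, st.2.insert "path" ln)
  else if pmoIsTxt ln then (st.1, st.2.insert "text" (pmoTextVal ln))
  else st

-- A's loop body when the line is not a header
def pmoStepNH (cur : PySem.Dict String String) (ln : String) : PySem.Dict String String :=
  if pmoIsNs ln then cur.insert "path" ln
  else if pmoIsTxt ln then cur.insert "text" (pmoTextVal ln)
  else cur

-- a string starting with (c :: p) has head c
lemma pmoStartswithHead (s : String) (c : Char) (p : List Char)
    (h : PySem.Chars.startswith s.toList (c :: p) = true) : s.toList.head? = some c := by
  rw [PySem.Chars.startswith_iff] at h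
  rcases h with ⟨t, ht⟩
  rw [← ht]; rfl

lemma pmoNs_not_txt (ln : String) (h : pmoIsNs ln = true) : pmoIsTxt ln = false := by
  unfold pmoIsNs at h
  unfold pmoIsTxt
  simp only [PySem.Str.startswith_eq, Bool.or_eq_true] at h ⊢
  have hn : ln.toList.head? = some 'n' := by
    rcases h with h | h
    · exact pmoStartswithHead ln 'n' ['s', '='] (by simpa using h)
    · exact pmoStartswithHead ln 'n' ['s', ':'] (by simpa using h)
  apply Bool.or_eq_false_iff.mpr
  constructor
  · by_contra hc
    rw [Bool.not_eq_false] at hc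
    have := pmoStartswithHead ln 't' ['e', 'x', 't', '='] (by simpa using hc)
    rw [hn] at this; simp at this
  · by_contra hc
    rw [Bool.not_eq_false] at hc
    have := pmoStartswithHead ln 't' ['e', 'x', 't', ':'] (by simpa using hc)
    rw [hn] at this; simp at this

-- on header-free lines, A's loop only updates cur
lemma pmoFoldA_noheader (ls : List String) (hnh : ∀ ln ∈ ls, pmoIsHdr ln = false) :
    ∀ (bs : List (PySem.Dict String String)) (cur : PySem.Dict String String),
    ls.foldl pmoStepA' (bs, cur) = (bs, ls.foldl pmoStepNH cur) := by
  induction ls with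
  | nil => intro bs cur; rfl
  | cons ln rest ih =>
    intro bs cur
    have h1 : pmoIsHdr ln = false := hnh ln (by simp)
    have h2 : ∀ l ∈ rest, pmoIsHdr l = false := fun l hl => hnh l (by simp [hl])
    simp only [List.foldl_cons]
    rw [← ih h2]
    congr 1
    unfold pmoStepA' pmoStepNH
    rw [h1]
    by_cases hns : pmoIsNs ln = true
    · simp [hns]
    · simp only [Bool.not_eq_true] at hns
      by_cases htx : pmoIsTxt ln = true <;> simp [hns, htx]

-- one non-header step on a fully-seeded block dict
lemma pmoStepNH_full (h p t ln : String) :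
    pmoStepNH ⟨[("score", h), ("path", p), ("text", t)]⟩ ln =
      ⟨[("score", h),
        ("path", if pmoIsNs ln then ln else p),
        ("text", if pmoIsTxt ln then pmoTextVal ln else t)]⟩ := by
  unfold pmoStepNH
  by_cases hns : pmoIsNs ln = true
  · rw [hns, pmoNs_not_txt ln hns]
    simp [PySem.Dict.insert, PySem.Dict.contains]
  · simp only [Bool.not_eq_true] at hns
    by_cases htx : pmoIsTxt ln = true
    · rw [hns, htx]
      simp [PySem.Dict.insert, PySem.Dict.contains]
    · simp only [Bool.not_eq_true] at htx
      simp [hns, htx]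

-- folding non-header lines over a seeded block dict = last-match searches from the end
lemma pmoFoldNH_seg (ls : List String) : ∀ (h p t : String),
    ls.foldl pmoStepNH ⟨[("score", h), ("path", p), ("text", t)]⟩ =
      ⟨[("score", h),
        ("path", (ls.reverse.find? pmoIsNs).getD p),
        ("text", ((ls.reverse.find? pmoIsTxt).map pmoTextVal).getD t)]⟩ := by
  induction ls with
  | nil => intro h p t; rfl
  | cons ln rest ih =>
    intro h p t
    simp only [List.foldl_cons, pmoStepNH_full, ih, List.reverse_cons, List.find?_append,
      List.find?_singleton]
    have hpath : ∀ (o : Option String),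
        (o.or (if pmoIsNs ln = true then some ln else none)).getD p =
          o.getD (if pmoIsNs ln = true then ln else p) := by
      intro o; cases o <;> by_cases hns : pmoIsNs ln = true <;> simp [hns]
    have htxt : ∀ (o : Option String),
        (Option.map pmoTextVal (o.or (if pmoIsTxt ln = true then some ln else none))).getD t =
          (Option.map pmoTextVal o).getD (if pmoIsTxt ln = true then pmoTextVal ln else t) := by
      intro o; cases o <;> by_cases htx : pmoIsTxt ln = true <;> simp [htx]
    rw [hpath, htxt]

-- folding A's non-header step from any dict = inserting the filtered key/value pairs
lemma pmoFoldNH_keyed (ls : List String) : ∀ (d : PySem.Dict String String),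
    ls.foldl pmoStepNH d =
      (((ls.filter (fun ln => pmoIsNs ln || pmoIsTxt ln)).map
          (fun ln => if pmoIsNs ln then (("path" : String), ln) else ("text", pmoTextVal ln))).foldl
        (fun acc p => acc.insert p.1 p.2) d) := by
  induction ls with
  | nil => intro d; rfl
  | cons ln rest ih =>
    intro d
    by_cases hns : pmoIsNs ln = true
    · simp [pmoStepNH, hns, ih]
    · simp only [Bool.not_eq_true] at hns
      by_cases htx : pmoIsTxt ln = true
      · simp [pmoStepNH, hns, htx, ih]
      · simp only [Bool.not_eq_true] at htx
        simp [pmoStepNH, hns, htx, ih]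

lemma pmoInsert_ne_nil (d : PySem.Dict String String) (k v : String) :
    (d.insert k v).items ≠ [] := by
  by_cases hc : d.contains k = true
  · rw [PySem.Dict.items_insert_of_contains d v hc]
    intro hnil
    have : d.items = [] := by simpa using hnil
    rw [PySem.Dict.contains, this] at hc
    simp at hc
  · rw [PySem.Dict.items_insert_of_not_contains d v (by simpa using hc)]
    simp

lemma pmoFoldInsert_ne_nil (kvs : List (String × String)) :
    ∀ (d : PySem.Dict String String), d.items ≠ [] →
    (kvs.foldl (fun acc p => acc.insert p.1 p.2) d).items ≠ [] := by
  induction kvs with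
  | nil => intro d hd; exact hd
  | cons kv rest ih =>
    intro d hd
    exact ih (d.insert kv.1 kv.2) (pmoInsert_ne_nil d kv.1 kv.2)

-- inserting into a nonempty dict never changes the key of the first item
lemma pmoInsert_head_key (d : PySem.Dict String String) (k v : String) (hd : d.items ≠ []) :
    ((d.insert k v).items.head?.map Prod.fst) = d.items.head?.map Prod.fst := by
  rw [PySem.Dict.items_insert]
  by_cases hc : d.contains k = true
  · rw [if_pos hc]
    cases hi : d.items with
    | nil => exact absurd hi hd
    | cons p rest =>
      simp only [List.map_cons, List.head?_cons, Option.map_some]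
      by_cases hpk : (p.1 == k) = true
      · simp [eq_of_beq hpk]
      · simp [hpk]
  · rw [if_neg hc]
    cases hi : d.items with
    | nil => exact absurd hi hd
    | cons p rest => simp

lemma pmoFoldInsert_head_key (kvs : List (String × String)) :
    ∀ (d : PySem.Dict String String), d.items ≠ [] →
    ((kvs.foldl (fun acc p => acc.insert p.1 p.2) d).items.head?.map Prod.fst) =
      d.items.head?.map Prod.fst := by
  induction kvs with
  | nil => intro d hd; rfl
  | cons kv rest ih =>
    intro d hd
    rw [List.foldl_cons, ih (d.insert kv.1 kv.2) (pmoInsert_ne_nil d kv.1 kv.2),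
      pmoInsert_head_key d kv.1 kv.2 hd]

def pmoSeed (h : String) : PySem.Dict String String :=
  ⟨[("score", h), ("path", ""), ("text", "")]⟩

lemma pmoOfListSeed (h : String) :
    PySem.Dict.ofList [("score", h), ("path", ""), ("text", "")] = pmoSeed h := by
  simp [PySem.Dict.ofList, PySem.Dict.update, PySem.Dict.empty, PySem.Dict.insert,
    PySem.Dict.contains, pmoSeed]

def pmoFinal (st : List (PySem.Dict String String) × PySem.Dict String String) :
    List (List (String × String)) :=
  (if st.2.items.isEmpty then st.1 else st.1 ++ [st.2]).map PySem.Dict.items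

-- A's fold over the flattened segments appends one block per segment
lemma pmoFoldA_segs : ∀ (segs : List (String × List String)),
    (∀ p ∈ segs, pmoIsHdr p.1 = true) →
    (∀ p ∈ segs, ∀ ln ∈ p.2, pmoIsHdr ln = false) →
    ∀ (bs : List (PySem.Dict String String)) (cur : PySem.Dict String String),
    pmoFinal (((segs.map (fun p => p.1 :: p.2)).flatten).foldl pmoStepA' (bs, cur)) =
      pmoFinal (bs, cur) ++ segs.map pmoBlockOf := by
  intro segs
  induction segs with
  | nil => intro _ _ bs cur; simp
  | cons seg rest ih =>
    intro hhdr hbody bs cur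
    have h1 : pmoIsHdr seg.1 = true := hhdr seg (by simp)
    have h2 : ∀ ln ∈ seg.2, pmoIsHdr ln = false := hbody seg (by simp)
    have h3 : ∀ p ∈ rest, pmoIsHdr p.1 = true := fun p hp => hhdr p (by simp [hp])
    have h4 : ∀ p ∈ rest, ∀ ln ∈ p.2, pmoIsHdr ln = false := fun p hp => hbody p (by simp [hp])
    simp only [List.map_cons, List.flatten_cons, List.foldl_append, List.foldl_cons]
    have hstep : pmoStepA' (bs, cur) seg.1 =
        ((if cur.items.isEmpty then bs else bs ++ [cur]), pmoSeed seg.1) := by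
      unfold pmoStepA'
      rw [if_pos h1, pmoOfListSeed]
    rw [hstep, pmoFoldA_noheader seg.2 h2]
    simp only [pmoSeed]
    rw [pmoFoldNH_seg, ih h3 h4]
    unfold pmoFinal
    simp [pmoBlockOf]

-- proof-side segmentation by a right fold: (leading header-free lines, (header, body) segments)
def pmoSegments (lines : List String) : List String × List (String × List String) :=
  lines.foldr (fun ln st =>
    if pmoIsHdr ln then ([], (ln, st.1) :: st.2) else (ln :: st.1, st.2)) ([], [])

-- decomposition produced by pmoSegments: lines = lead ++ flatten(header :: body); lead and
-- bodies are header-free, every segment head is a header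
lemma pmoSegments_spec (lines : List String) :
    lines = (pmoSegments lines).1 ++ (((pmoSegments lines).2.map (fun p => p.1 :: p.2)).flatten)
    ∧ (∀ ln ∈ (pmoSegments lines).1, pmoIsHdr ln = false)
    ∧ (∀ p ∈ (pmoSegments lines).2, pmoIsHdr p.1 = true)
    ∧ (∀ p ∈ (pmoSegments lines).2, ∀ ln ∈ p.2, pmoIsHdr ln = false) := by
  induction lines with
  | nil => simp [pmoSegments]
  | cons ln rest ih =>
    obtain ⟨ihd, ihlead, ihhdr, ihbody⟩ := ih
    have hseg : pmoSegments (ln :: rest) =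
        (if pmoIsHdr ln then ([], (ln, (pmoSegments rest).1) :: (pmoSegments rest).2)
         else (ln :: (pmoSegments rest).1, (pmoSegments rest).2)) := rfl
    by_cases hh : pmoIsHdr ln = true
    · rw [hseg, if_pos hh]
      refine ⟨?_, by simp, ?_, ?_⟩
      · simpa using ihd
      · intro p hp
        rcases List.mem_cons.mp hp with h | h
        · rw [h]; exact hh
        · exact ihhdr p h
      · intro p hp
        rcases List.mem_cons.mp hp with h | h
        · rw [h]; exact ihlead
        · exact ihbody p h
    · simp only [Bool.not_eq_true] at hh
      rw [hseg, if_neg (by simp [hh])]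
      refine ⟨?_, ?_, ihhdr, ihbody⟩
      · simpa using ihd
      · intro l hl
        rcases List.mem_cons.mp hl with h | h
        · rw [h]; exact hh
        · exact ihlead l h

-- the lead of pmoSegments is the header-free prefix
lemma pmoSegments_lead (lines : List String) :
    (pmoSegments lines).1 = lines.takeWhile (fun ln => !pmoIsHdr ln) := by
  induction lines with
  | nil => rfl
  | cons ln rest ih =>
    have hseg : pmoSegments (ln :: rest) =
        (if pmoIsHdr ln then ([], (ln, (pmoSegments rest).1) :: (pmoSegments rest).2)
         else (ln :: (pmoSegments rest).1, (pmoSegments rest).2)) := rfl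
    by_cases hh : pmoIsHdr ln = true
    · rw [hseg, if_pos hh]; simp [hh]
    · simp only [Bool.not_eq_true] at hh
      rw [hseg, if_neg (by simp [hh])]
      simp [hh, ih]

-- B's forward fold computes pmoSegments's segments, merging lead lines into acc's last segment
lemma pmoSegF_spec : ∀ (lines : List String) (acc : List (String × List String)),
    lines.foldl pmoSegStepF acc =
      (match acc.getLast? with
       | none => []
       | some last => acc.dropLast ++ [(last.1, last.2 ++ (pmoSegments lines).1)]) ++
        (pmoSegments lines).2 := by
  intro lines
  induction lines with
  | nil =>
    intro acc
    rcases acc.eq_nil_or_concat with h | ⟨l, x, h⟩ <;> subst h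
    · rfl
    · simp [pmoSegments]
  | cons ln rest ih =>
    intro acc
    have hseg : pmoSegments (ln :: rest) =
        (if pmoIsHdr ln then ([], (ln, (pmoSegments rest).1) :: (pmoSegments rest).2)
         else (ln :: (pmoSegments rest).1, (pmoSegments rest).2)) := rfl
    rw [List.foldl_cons]
    by_cases hh : pmoIsHdr ln = true
    · rw [hseg, if_pos hh]
      have hstep : pmoSegStepF acc ln = acc ++ [(ln, [])] := by
        unfold pmoSegStepF; rw [if_pos hh]
      rw [hstep, ih]
      simp only [List.getLast?_concat, List.dropLast_concat]
      rcases acc.eq_nil_or_concat with h | ⟨l, x, h⟩ <;> subst h <;> simp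
    · simp only [Bool.not_eq_true] at hh
      rw [hseg, if_neg (by simp [hh])]
      have hstep : pmoSegStepF acc ln =
          (match acc.getLast? with
           | none => acc
           | some last => acc.dropLast ++ [(last.1, last.2 ++ [ln])]) := by
        unfold pmoSegStepF; rw [if_neg (by simp [hh])]
      rw [hstep]
      rcases acc.eq_nil_or_concat with h | ⟨l, x, h⟩ <;> subst h
      · simp [ih]
      · rw [ih]
        simp

-- ===== VERDICT (by name: the statements are the Claim_ definitions above) =====
theorem parse_milvus_output_spec : Claim_unchanged_parse_milvus_output := by
  intro text _ hnd
  simp only [parse_milvus_output, parse_milvus_output_alt]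
  have hfoldmap : (PySem.Str.splitlines text).foldl pmoStepA ([], PySem.Dict.empty) =
      ((PySem.Str.splitlines text).map PySem.Str.strip).foldl pmoStepA' ([], PySem.Dict.empty) := by
    rw [List.foldl_map]; rfl
  rw [hfoldmap]
  set lines := (PySem.Str.splitlines text).map PySem.Str.strip with hl
  obtain ⟨hd, hlead, hhdr, hbody⟩ := pmoSegments_spec lines
  set lead := (pmoSegments lines).1 with hlead_def
  set segs := (pmoSegments lines).2 with hsegs_def
  -- ¬D_: no ns/text line in the header-free prefix, so the filtered lead pairs are empty
  have hkeyed : lead.filter (fun ln => pmoIsNs ln || pmoIsTxt ln) = [] := by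
    rw [hlead_def, pmoSegments_lead, List.filter_eq_nil_iff]
    intro ln hln hp
    unfold D_parse_milvus_output at hnd
    rw [List.any_eq_true] at hnd
    exact hnd ⟨ln, hln, hp⟩
  conv_lhs => rw [hd]
  rw [List.foldl_append, pmoFoldA_noheader lead hlead, pmoFoldNH_keyed, hkeyed]
  simp only [List.map_nil, List.foldl_nil]
  have hfin : ∀ (st : List (PySem.Dict String String) × PySem.Dict String String),
      List.map PySem.Dict.items
          (List.take 5 (if st.2.items.isEmpty then st.1 else st.1 ++ [st.2])) =
        List.take 5 (pmoFinal st) := by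
    intro st; rw [List.map_take]; rfl
  rw [hfin, pmoFoldA_segs segs hhdr hbody [] PySem.Dict.empty]
  rw [pmoSegF_spec lines []]
  simp only [List.getLast?_nil]
  simp only [pmoFinal, PySem.Dict.empty, List.map_take, ← hsegs_def]
  simp

theorem parse_milvus_output_changed : Claim_changed_parse_milvus_output := by
  unfold Claim_changed_parse_milvus_output; decide

theorem parse_milvus_output_tight : Claim_exact_parse_milvus_output := by
  intro text _ hD heq
  simp only [parse_milvus_output, parse_milvus_output_alt] at heq
  have hfoldmap : (PySem.Str.splitlines text).foldl pmoStepA ([], PySem.Dict.empty) =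
      ((PySem.Str.splitlines text).map PySem.Str.strip).foldl pmoStepA' ([], PySem.Dict.empty) := by
    rw [List.foldl_map]; rfl
  rw [hfoldmap] at heq
  set lines := (PySem.Str.splitlines text).map PySem.Str.strip with hl
  obtain ⟨hd, hlead, hhdr, hbody⟩ := pmoSegments_spec lines
  set lead := (pmoSegments lines).1 with hlead_def
  set segs := (pmoSegments lines).2 with hsegs_def
  set keyed := (lead.filter (fun ln => pmoIsNs ln || pmoIsTxt ln)).map
      (fun ln => if pmoIsNs ln then (("path" : String), ln) else ("text", pmoTextVal ln)) with hkeyed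
  -- D_: the filtered lead is nonempty and its pairs never use the key "score"
  have hfilter : lead.filter (fun ln => pmoIsNs ln || pmoIsTxt ln) ≠ [] := by
    unfold D_parse_milvus_output at hD
    rw [List.any_eq_true] at hD
    rcases hD with ⟨ln, hmem, hp⟩
    intro hnil
    have : ln ∈ lead.filter (fun ln => pmoIsNs ln || pmoIsTxt ln) := by
      rw [List.mem_filter]
      exact ⟨by rw [hlead_def, pmoSegments_lead]; exact hmem, hp⟩
    rw [hnil] at this
    simp at this
  set dLead := keyed.foldl (fun acc p => acc.insert p.1 p.2)
      (PySem.Dict.empty : PySem.Dict String String) with hdl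
  cases hfe : lead.filter (fun ln => pmoIsNs ln || pmoIsTxt ln) with
  | nil => exact hfilter hfe
  | cons ln0 restf =>
  have hkeyed_cons : keyed = (if pmoIsNs ln0 then (("path" : String), ln0)
      else ("text", pmoTextVal ln0)) ::
      restf.map (fun ln => if pmoIsNs ln then (("path" : String), ln) else ("text", pmoTextVal ln)) := by
    rw [hkeyed, hfe, List.map_cons]
  -- dLead is nonempty and its first key is "path" or "text"
  have hdne : dLead.items ≠ [] := by
    rw [hdl, hkeyed_cons, List.foldl_cons]
    exact pmoFoldInsert_ne_nil _ _ (pmoInsert_ne_nil _ _ _)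
  have hheadkey : dLead.items.head?.map Prod.fst =
      some (if pmoIsNs ln0 then "path" else "text") := by
    rw [hdl, hkeyed_cons, List.foldl_cons,
      pmoFoldInsert_head_key _ _ (pmoInsert_ne_nil _ _ _)]
    by_cases hns : pmoIsNs ln0 = true
    · simp [hns, PySem.Dict.insert, PySem.Dict.empty, PySem.Dict.contains]
    · simp only [Bool.not_eq_true] at hns
      simp [hns, PySem.Dict.insert, PySem.Dict.empty, PySem.Dict.contains]
  have hkey_ne : dLead.items.head?.map Prod.fst ≠ some "score" := by
    rw [hheadkey]
    by_cases hns : pmoIsNs ln0 = true <;> simp [hns]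
  -- rewrite A's side through the segment decomposition
  conv_lhs at heq => rw [hd]
  rw [List.foldl_append, pmoFoldA_noheader lead hlead, pmoFoldNH_keyed, ← hkeyed, ← hdl] at heq
  have hfin : ∀ (st : List (PySem.Dict String String) × PySem.Dict String String),
      List.map PySem.Dict.items
          (List.take 5 (if st.2.items.isEmpty then st.1 else st.1 ++ [st.2])) =
        List.take 5 (pmoFinal st) := by
    intro st; rw [List.map_take]; rfl
  rw [hfin, pmoFoldA_segs segs hhdr hbody [] dLead] at heq
  rw [pmoSegF_spec lines []] at heq
  simp only [List.getLast?_nil] at heq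
  have hfinal : pmoFinal ([], dLead) = [dLead.items] := by
    unfold pmoFinal
    have : dLead.items.isEmpty = false := by simpa [List.isEmpty_iff] using hdne
    simp [this]
  rw [hfinal] at heq
  simp only [List.singleton_append, List.nil_append] at heq
  have htk : List.take 5 (dLead.items :: List.map pmoBlockOf segs) =
      dLead.items :: List.take 4 (List.map pmoBlockOf segs) := rfl
  rw [htk] at heq
  -- compare heads: A's first block has no "score" first key, B's (if any) does
  have hheads := congrArg List.head? heq
  cases hs : segs.take 5 with
  | nil =>
    rw [hs] at hheads
    simp at hheads
  | cons s ss =>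
    rw [hs] at hheads
    simp only [List.head?_cons, List.map_cons, Option.some_inj] at hheads
    have : dLead.items.head?.map Prod.fst = some "score" := by
      rw [hheads]
      simp [pmoBlockOf]
    exact hkey_ne this
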